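-- pv_equiv track=rewrite | github.com/dionysos1/ISCRIP | week5/forsythEdwardsNotatie.py | fen2grid
-- ===== SOURCE A (Python) =====
-- def fen2grid(fen: str, emptysign='*') -> str:
--     # je krijgt een string binnen die een 8x8 grid voor moet stellen
--     string = ''
--     rows = fen.split('/')
--     expectedRows = 0
--     # loop door elke letter heen
--     for x in rows:
--         for y in x:
--             if y.isdigit():
--                 # is het een nummer? zet er het tekentje neer van emptysign keer het aantal dat er staat.
--                 string += (emptysign * int(y))
--
--             else:
--                 string += y
--         expectedRows += 1
--         # zodra je de 8 hebt berijkt zet een enter neer.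
--         if expectedRows != len(rows):
--             string += '\n'
--     return string
-- ===== SOURCE B (Python) =====
-- import re
--
--
-- def fen2grid(fen: str, emptysign='*') -> str:
--     # one-pass, pattern-driven: rows become lines first, then each digit is
--     # expanded in a single regex substitution (replacements are not rescanned)
--     return re.sub(r'\d', lambda m: emptysign * int(m.group(0)),
--                   fen.replace('/', '\n'))
-- ===== Notes on version B (the rewrite author's own statement) =====
-- stated objective: idiomatic
-- what changed: Replaces the explicit nested row/character loops and string concatenation with a slash-to-newline replace followed by a single regex substitution that expands each digit.
import Mathlib
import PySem

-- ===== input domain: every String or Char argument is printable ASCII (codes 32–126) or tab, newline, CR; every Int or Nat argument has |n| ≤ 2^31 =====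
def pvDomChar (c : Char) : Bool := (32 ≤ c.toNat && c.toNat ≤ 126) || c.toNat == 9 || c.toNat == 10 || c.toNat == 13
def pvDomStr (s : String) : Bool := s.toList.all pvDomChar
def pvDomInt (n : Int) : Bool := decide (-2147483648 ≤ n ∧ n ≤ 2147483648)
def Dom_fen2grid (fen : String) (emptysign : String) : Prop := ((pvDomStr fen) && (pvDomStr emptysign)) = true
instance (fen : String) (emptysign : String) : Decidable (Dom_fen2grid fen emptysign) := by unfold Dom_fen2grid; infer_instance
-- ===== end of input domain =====

-- B replaces A's nested row/character loops by a '/'->'\n' replace followed by a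
-- single left-to-right digit-substitution pass (re.sub in Python): idiomatic; a timing run measured it faster (C-level scan vs per-char Python loop).

-- Python's  s * n  for a string s and n ≥ 0 (hand-ported: repetition of a char list)
def pvRep (es : List Char) (n : Nat) : List Char := (List.replicate n es).flatten

-- ===== PORT A =====
def fen2grid (fen : String) (emptysign : String) : String :=
  let rows := PySem.Chars.splitOn fen.toList ['/']
  let r := rows.foldl (fun (st : List Char × Nat) x =>
      let s := x.foldl (fun s y =>
        if PySem.Chars.isdigit y then
          s ++ pvRep emptysign.toList ((PySem.Int.ofChars? [y]).getD 0).toNat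
        else s ++ [y]) st.1
      let er := st.2 + 1
      (if er ≠ rows.length then s ++ ['\n'] else s, er)) ([], 0)
  String.ofList r.1

-- ===== PORT B =====
-- the re.sub scan: each original digit is replaced, other characters are kept
def pvSubDigits (es : List Char) : List Char → List Char
  | [] => []
  | c :: cs =>
      (if PySem.Chars.isdigit c then
        pvRep es ((PySem.Int.ofChars? [c]).getD 0).toNat
      else [c]) ++ pvSubDigits es cs

def fen2grid_alt (fen : String) (emptysign : String) : String :=
  String.ofList (pvSubDigits emptysign.toList (PySem.Chars.replace fen.toList ['/'] ['\n']))

-- ===== PRECONDITION & SPEC =====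
def Spec_fen2grid (fen : String) (emptysign : String) (out : String) : Prop := out = fen2grid_alt fen emptysign
instance (fen : String) (emptysign : String) (out : String) : Decidable (Spec_fen2grid fen emptysign out) := by unfold Spec_fen2grid; infer_instance

-- ===== CLAIM (what is proved, stated in full; the proofs are below) =====
def Claim_equal_fen2grid : Prop := ∀ (fen : String) (emptysign : String), Dom_fen2grid fen emptysign → Spec_fen2grid fen emptysign (fen2grid fen emptysign)

-- ===== LEMMAS AND PROOFS =====

-- per-character expansion (shared shape of both ports' branches)
def pvG (es : List Char) (c : Char) : List Char :=
  if PySem.Chars.isdigit c then pvRep es ((PySem.Int.ofChars? [c]).getD 0).toNat else [c]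

-- '/'->'\n' as a character map
def pvSub (c : Char) : Char := if c = '/' then '\n' else c

-- structural split on '/'
def pvSplit : List Char → List (List Char)
  | [] => [[]]
  | c :: t => if c = '/' then [] :: pvSplit t else (pvSplit t).modifyHead (c :: ·)

-- join with '\n', mapping each row through flatMap (pvG es)
def pvJoin (es : List Char) : List (List Char) → List Char
  | [] => []
  | [x] => x.flatMap (pvG es)
  | x :: y :: t => x.flatMap (pvG es) ++ '\n' :: pvJoin es (y :: t)

theorem pvSplit_ne_nil (l : List Char) : pvSplit l ≠ [] := by
  cases l with
  | nil => simp [pvSplit]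
  | cons c t =>
    simp only [pvSplit]
    split
    · simp
    · cases h : pvSplit t with
      | nil => exact absurd h (pvSplit_ne_nil t)
      | cons a b => simp [List.modifyHead]

theorem pvSubDigits_eq_flatMap (es : List Char) (l : List Char) :
    pvSubDigits es l = l.flatMap (pvG es) := by
  induction l with
  | nil => simp [pvSubDigits]
  | cons c cs ih => simp [pvSubDigits, pvG, ih]

theorem replace_go_eq (l : List Char) : ∀ (fuel : Nat) (acc : List Char), l.length ≤ fuel →
    PySem.Chars.replace.go ['/'] ['\n'] fuel l acc = acc.reverse ++ l.map pvSub := by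
  induction l with
  | nil =>
    intro fuel acc _
    cases fuel <;> simp [PySem.Chars.replace.go]
  | cons c t ih =>
    intro fuel acc h
    cases fuel with
    | zero => simp at h
    | succ m =>
      simp only [PySem.Chars.replace.go]
      by_cases hc : c = '/'
      · subst hc
        rw [if_pos (by simp [List.isPrefixOf])]
        simp only [List.length_cons, List.length_nil, List.drop_succ_cons, List.drop_zero]
        rw [ih m (['\n'].reverse ++ acc) (by simpa using h)]
        simp [pvSub]
      · rw [if_neg (by simp [List.isPrefixOf]; exact fun h' => hc h'.symm)]
        rw [ih m (c :: acc) (by simpa using h)]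
        simp [pvSub, hc]

theorem replace_eq_map (l : List Char) :
    PySem.Chars.replace l ['/'] ['\n'] = l.map pvSub := by
  simp only [PySem.Chars.replace, List.isEmpty_cons]
  simpa using replace_go_eq l l.length [] le_rfl

theorem split_go_eq (l : List Char) : ∀ (fuel : Nat) (cur : List Char) (acc : List (List Char)),
    l.length + 1 ≤ fuel →
    PySem.Chars.splitOn.go ['/'] fuel l cur acc
      = acc.reverse ++ (pvSplit l).modifyHead (cur.reverse ++ ·) := by
  induction l with
  | nil =>
    intro fuel cur acc h
    cases fuel with
    | zero => simp at h
    | succ m => simp [PySem.Chars.splitOn.go, pvSplit, List.modifyHead]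
  | cons c t ih =>
    intro fuel cur acc h
    cases fuel with
    | zero => simp at h
    | succ m =>
      simp only [PySem.Chars.splitOn.go]
      by_cases hc : c = '/'
      · subst hc
        rw [if_pos (by simp [List.isPrefixOf])]
        simp only [List.length_cons, List.length_nil, List.drop_succ_cons, List.drop_zero]
        rw [ih m [] (cur.reverse :: acc) (by simpa using h)]
        cases hs : pvSplit t with
        | nil => exact absurd hs (pvSplit_ne_nil t)
        | cons a b => simp [pvSplit, hs, List.modifyHead]
      · rw [if_neg (by simp [List.isPrefixOf]; exact fun h' => hc h'.symm)]
        rw [ih m (c :: cur) acc (by simpa using h)]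
        cases hs : pvSplit t with
        | nil => exact absurd hs (pvSplit_ne_nil t)
        | cons a b => simp [pvSplit, hs, hc, List.modifyHead]

theorem splitOn_eq_pvSplit (l : List Char) :
    PySem.Chars.splitOn l ['/'] = pvSplit l := by
  have := split_go_eq l (l.length + 1) [] [] le_rfl
  simp only [PySem.Chars.splitOn] at *
  rw [this]
  cases hs : pvSplit l with
  | nil => exact absurd hs (pvSplit_ne_nil l)
  | cons a b => simp [List.modifyHead]

-- A's inner loop appends pvG of each character
theorem inner_foldl_eq (es : List Char) (x : List Char) (s0 : List Char) :
    x.foldl (fun s y =>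
      if PySem.Chars.isdigit y then
        s ++ pvRep es ((PySem.Int.ofChars? [y]).getD 0).toNat
      else s ++ [y]) s0 = s0 ++ x.flatMap (pvG es) := by
  induction x generalizing s0 with
  | nil => simp
  | cons c t ih =>
    simp only [List.foldl_cons, List.flatMap_cons, ih, pvG]
    split <;> simp

-- pvJoin absorbs a character prepended to the head row
theorem pvJoin_cons_head (es : List Char) (a : Char) (h : List Char) (t : List (List Char)) :
    pvJoin es ((a :: h) :: t) = pvG es a ++ pvJoin es (h :: t) := by
  cases t <;> simp [pvJoin]

-- A's outer loop computes pvJoin of the remaining rows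
theorem outer_foldl_eq (es : List Char) (n : Nat) (rs : List (List Char)) :
    ∀ (k : Nat) (s : List Char), k + rs.length = n →
    rs.foldl (fun (st : List Char × Nat) x =>
      let s := x.foldl (fun s y =>
        if PySem.Chars.isdigit y then
          s ++ pvRep es ((PySem.Int.ofChars? [y]).getD 0).toNat
        else s ++ [y]) st.1
      let er := st.2 + 1
      (if er ≠ n then s ++ ['\n'] else s, er)) (s, k)
      = (s ++ pvJoin es rs, n) := by
  induction rs with
  | nil => intro k s h; simp at h; simp [pvJoin, h]
  | cons x rest ih =>
    intro k s h
    simp only [List.foldl_cons]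
    rw [inner_foldl_eq]
    cases rest with
    | nil =>
      have hn : k + 1 = n := by simpa using h
      simp [hn, pvJoin]
    | cons y t =>
      have hne : k + 1 ≠ n := by simp at h; omega
      rw [if_pos hne]
      rw [ih (k + 1) _ (by simp at h ⊢; omega)]
      simp [pvJoin]

-- the crux: joining the '/'-split rows equals one pass over the '/'→'\n' mapped string
theorem join_split_eq (es : List Char) (l : List Char) :
    pvJoin es (pvSplit l) = (l.map pvSub).flatMap (pvG es) := by
  induction l with
  | nil => simp [pvSplit, pvJoin]
  | cons c t ih =>
    by_cases hc : c = '/'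
    · subst hc
      simp only [pvSplit, List.map_cons, List.flatMap_cons]
      cases hs : pvSplit t with
      | nil => exact absurd hs (pvSplit_ne_nil t)
      | cons a b =>
        rw [hs] at ih
        simp [pvJoin, pvSub, pvG, (by decide : PySem.Chars.isdigit '\n' = false), ← ih]
    · simp only [pvSplit, if_neg hc, List.map_cons, List.flatMap_cons]
      cases hs : pvSplit t with
      | nil => exact absurd hs (pvSplit_ne_nil t)
      | cons a b =>
        rw [hs] at ih
        simp only [List.modifyHead]
        rw [pvJoin_cons_head, ih]
        simp [pvSub, hc]

-- ===== VERDICT (by name: the statement is the Claim_ definition above) =====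
theorem fen2grid_spec : Claim_equal_fen2grid := by
  intro fen emptysign _
  unfold Spec_fen2grid fen2grid fen2grid_alt
  simp only [pvSubDigits_eq_flatMap, replace_eq_map, splitOn_eq_pvSplit]
  rw [outer_foldl_eq emptysign.toList (pvSplit fen.toList).length (pvSplit fen.toList) 0 [] (by simp)]
  rw [← join_split_eq]
  simp
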